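-- pv_equiv track=rewrite | github.com/FireCrosser/TermPaper2016 | Development/TwitterTags/twittertags/additional_functions.py | similar_tweets
-- ===== SOURCE A (Python) =====
-- import math
-- import operator
--
-- def similar_tweets(words, tweets, num_of_main_words=3):
--     words_frequency = {}
--     for tweet_index in range(len(tweets)):
--         for word in words:
--             if word in tweets[tweet_index]:
--                 if word in words_frequency:
--                     words_frequency[word] += 1
--                 else:
--                     words_frequency[word] = 1
--     tweets_len = len(tweets)
--     for word in words_frequency:
--         words_frequency[word] = math.log(tweets_len/words_frequency[word])
--     unique_words = []
--     for i in range(num_of_main_words):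
--         if len(words_frequency) == 0:
--             break
--         curr_max = max(words_frequency.items(), key=operator.itemgetter(1))[0]
--         unique_words.append(curr_max)
--         words_frequency.pop(curr_max)
--     result_tweets_list = []
--     for tweet in tweets:
--         for word in unique_words:
--             if word in tweet:
--                 result_tweets_list.append(tweet)
--                 break
--     return result_tweets_list
-- ===== SOURCE B (Python) =====
-- import operator
--
-- def similar_tweets(words, tweets, num_of_main_words=3):
--     # count, per word, the number of tweets-scan hits (same insertion order as A)
--     counts = {}
--     for tweet in tweets:
--         for word in words:
--             if word in tweet:
--                 counts[word] = counts.get(word, 0) + 1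
--     # idf = log(len(tweets)/count) is strictly decreasing in count, so the
--     # top-idf words are exactly the lowest-count words; a single stable sort
--     # replaces the repeated max-and-pop loop (ties keep insertion order).
--     scored = sorted(counts.items(), key=operator.itemgetter(1))
--     top = [w for w, _ in scored[:max(0, num_of_main_words)]]
--     return [t for t in tweets if any(w in t for w in top)]
-- ===== Notes on version B (the rewrite author's own statement) =====
-- stated objective: simpler
-- what changed: B drops the float IDF scores entirely (log(len(tweets)/count) is strictly decreasing in count) and replaces A's repeated max-and-pop selection loop with a single stable sort of the raw counts plus a clamped slice; the final loop becomes a filter comprehension.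
import Mathlib
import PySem

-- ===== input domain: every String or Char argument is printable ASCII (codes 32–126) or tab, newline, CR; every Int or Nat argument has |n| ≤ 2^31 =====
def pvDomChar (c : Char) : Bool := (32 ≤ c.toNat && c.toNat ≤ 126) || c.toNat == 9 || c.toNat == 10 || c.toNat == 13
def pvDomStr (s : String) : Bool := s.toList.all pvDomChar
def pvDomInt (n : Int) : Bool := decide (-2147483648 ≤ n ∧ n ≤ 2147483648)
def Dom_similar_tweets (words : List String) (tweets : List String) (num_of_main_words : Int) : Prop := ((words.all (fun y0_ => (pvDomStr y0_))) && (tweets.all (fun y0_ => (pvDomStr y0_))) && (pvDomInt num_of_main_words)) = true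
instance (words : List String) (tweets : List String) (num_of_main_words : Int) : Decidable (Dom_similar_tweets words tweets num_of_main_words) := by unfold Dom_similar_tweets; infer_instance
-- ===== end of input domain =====

-- B replaces A's float IDF scores and repeated max-and-pop selection loop with one
-- stable sort of the raw counts (log(len/c) is strictly decreasing in c, and stable
-- sort reproduces first-extremal tie-breaking); objective: simpler.

-- ===== PORT A =====
-- One iteration of A's `for i in range(num_of_main_words)` selection loop.
-- A takes `max(words_frequency.items(), key=itemgetter(1))` where the stored value is
-- math.log(tweets_len / count).  Floats are not representable here; since that value is
-- strictly decreasing in the positive count (counts are in 1..len(tweets), well inside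
-- double precision, so distinct counts give distinct floats and math.log keeps their
-- order), the FIRST maximum by the log value is exactly the FIRST minimum by the raw
-- count: the comparison is ported exactly as the reversed Int comparison on the counts.
def similar_tweets_selA : Nat → PySem.Dict String Int → List String
  | 0, _ => []
  | n + 1, d =>
    if d.size = 0 then []
    else
      match PySem.List.min? d.items (fun p => p.2) with
      | none => []                                   -- unreachable: items nonempty
      | some m => m.1 :: similar_tweets_selA n (d.erase m.1)

def similar_tweets (words : List String) (tweets : List String) (num_of_main_words : Int) : List String :=
  -- `tweets[tweet_index]` with tweet_index ∈ range(len(tweets)) is always in range,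
  -- so `getD _ ""` is exact here.
  let words_frequency : PySem.Dict String Int :=
    (List.range tweets.length).foldl (fun d tweet_index =>
      words.foldl (fun d word =>
        if PySem.Str.isIn word (tweets.getD tweet_index "") then
          if d.contains word then d.modify word 0 (· + 1) else d.insert word 1
        else d) d)
      PySem.Dict.empty
  -- range(num_of_main_words) over an Int runs max(0, n) = n.toNat iterations
  let unique_words := similar_tweets_selA num_of_main_words.toNat words_frequency
  -- inner `for word in unique_words: if word in tweet: append; break` appends the
  -- tweet once iff some selected word occurs in it = `any`
  tweets.foldl (fun acc tweet =>
    if unique_words.any (fun word => PySem.Str.isIn word tweet) then acc ++ [tweet]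
    else acc) []

-- ===== PORT B =====
def similar_tweets_alt (words : List String) (tweets : List String) (num_of_main_words : Int) : List String :=
  let counts : PySem.Dict String Int :=
    tweets.foldl (fun d tweet =>
      words.foldl (fun d word =>
        if PySem.Str.isIn word tweet then d.insert word (d.getD word 0 + 1) else d) d)
      PySem.Dict.empty
  let scored := PySem.List.sorted counts.items (fun p => p.2)
  let top := (PySem.List.slice scored none (some (max 0 num_of_main_words))).map (fun p => p.1)
  tweets.filter fun t => top.any fun w => PySem.Str.isIn w t

-- ===== PRECONDITION & SPEC =====
def Spec_similar_tweets (words : List String) (tweets : List String) (num_of_main_words : Int) (out : List String) : Prop := out = similar_tweets_alt words tweets num_of_main_words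
instance (words : List String) (tweets : List String) (num_of_main_words : Int) (out : List String) : Decidable (Spec_similar_tweets words tweets num_of_main_words out) := by unfold Spec_similar_tweets; infer_instance

-- ===== CLAIM (what is proved, stated in full; the proofs are below) =====
def Claim_equal_similar_tweets : Prop := ∀ (words : List String) (tweets : List String) (num_of_main_words : Int), Dom_similar_tweets words tweets num_of_main_words → Spec_similar_tweets words tweets num_of_main_words (similar_tweets words tweets num_of_main_words)

-- ===== LEMMAS AND PROOFS =====

-- Phase 1: the two per-word update steps build the same dict.
lemma pv_step_eq (d : PySem.Dict String Int) (w t : String) :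
    (if PySem.Str.isIn w t then
       if d.contains w then d.modify w 0 (· + 1) else d.insert w 1
     else d)
    = (if PySem.Str.isIn w t then d.insert w (d.getD w 0 + 1) else d) := by
  cases hin : PySem.Str.isIn w t
  · rfl
  · simp only [if_true]
    cases hc : d.contains w
    · simp only [Bool.false_eq_true, if_false]
      rw [PySem.Dict.getD_of_not_contains d 0 hc]
      norm_num
    · simp only [if_true]
      rfl

-- Folding over range(len(l)) with l[i] is folding over l.
lemma pv_foldl_range_getD {β : Type} (l : List String) (g : β → String → β) (e : β) :
    (List.range l.length).foldl (fun d i => g d (l.getD i "")) e = l.foldl g e := by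
  have hmap : (List.range l.length).map (fun i => l.getD i "") = l := by
    apply List.ext_getElem
    · simp
    · intro i h1 h2
      simp [List.getD_eq_getElem?_getD, h2]
  conv_rhs => rw [← hmap]
  rw [List.foldl_map]

-- foldl preserves an invariant
lemma pv_foldl_pres {α β : Type} (P : β → Prop) (f : β → α → β)
    (h : ∀ b a, P b → P (f b a)) : ∀ (l : List α) (b : β), P b → P (l.foldl f b)
  | [], _, hb => hb
  | a :: l, b, hb => pv_foldl_pres P f h l (f b a) (h b a hb)

-- min? over a snoc
lemma pv_min?_snoc {α κ : Type} [LT κ] [DecidableLT κ] (l : List α) (x : α) (key : α → κ) :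
    PySem.List.min? (l ++ [x]) key
      = match PySem.List.min? l key with
        | none => some x
        | some m => if key x < key m then some x else some m := by
  simp only [PySem.List.min?, List.foldl_append, List.foldl]
  rfl

-- sorted over a snoc is one insertion
lemma pv_sorted_snoc {α κ : Type} [LT κ] [DecidableLT κ] (l : List α) (x : α) (key : α → κ) :
    PySem.List.sorted (l ++ [x]) key
      = PySem.List.insertBy (fun a b => decide (key a < key b)) x (PySem.List.sorted l key) := by
  rw [PySem.List.sorted_eq_foldl_insertBy, PySem.List.sorted_eq_foldl_insertBy, List.foldl_append]
  rfl

-- Core: for key-distinct pairs, the stable sort is (first minimum) :: (sort of the rest).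
lemma pv_sorted_min_cons (l : List (String × Int)) (hn : (l.map Prod.fst).Nodup)
    (m : String × Int) (h : PySem.List.min? l (fun p => p.2) = some m) :
    PySem.List.sorted l (fun p => p.2)
      = m :: PySem.List.sorted (l.filter (fun p => !(p.1 == m.1))) (fun p => p.2) := by
  induction l using List.reverseRecOn generalizing m with
  | nil => simp [PySem.List.min?] at h
  | append_singleton l x ih =>
    have hn2 : (List.map Prod.fst l ++ [x.1]).Nodup := by simpa using hn
    have hn' : (List.map Prod.fst l).Nodup := (List.nodup_append.mp hn2).1
    have hx : x.1 ∉ List.map Prod.fst l := by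
      intro hmem
      exact (List.nodup_append.mp hn2).2.2 x.1 hmem x.1 (by simp) rfl
    rw [pv_min?_snoc] at h
    rcases hl : PySem.List.min? l (fun p => p.2) with _ | m0
    · -- l is empty
      have hl0 : l = [] := (PySem.List.min?_eq_none_iff _ _).mp hl
      subst hl0
      simp only [PySem.List.min?, List.foldl] at h
      obtain rfl : x = m := by simpa using h
      simp [PySem.List.sorted, PySem.List.insertBy]
    · rw [hl] at h
      have hm0l : m0 ∈ l := PySem.List.min?_mem hl
      have hxm0 : x.1 ≠ m0.1 := by
        intro he
        exact hx (he ▸ List.mem_map_of_mem hm0l)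
      by_cases hlt : x.2 < m0.2
      · have hm : m = x := by simp only [hlt, if_true] at h; exact (Option.some.inj h).symm
        subst hm
        have hfl : l.filter (fun p => !(p.1 == m.1)) = l := by
          apply List.filter_eq_self.mpr
          intro p hp
          simp only [Bool.not_eq_eq_eq_not, Bool.not_true, beq_eq_false_iff_ne]
          intro he
          exact hx (he ▸ List.mem_map_of_mem hp)
        rw [pv_sorted_snoc, ih hn' m0 hl]
        have hfx : (l ++ [m]).filter (fun p => !(p.1 == m.1)) = l := by
          rw [List.filter_append, hfl]; simp
        rw [hfx, ih hn' m0 hl]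
        simp [PySem.List.insertBy, hlt]
      · have hm : m = m0 := by simp only [hlt, if_false] at h; exact (Option.some.inj h).symm
        subst hm
        have hfx : (l ++ [x]).filter (fun p => !(p.1 == m.1)) = l.filter (fun p => !(p.1 == m.1)) ++ [x] := by
          rw [List.filter_append]
          simp [hxm0]
        rw [pv_sorted_snoc, ih hn' m hl, hfx, pv_sorted_snoc]
        simp [PySem.List.insertBy, hlt]

-- Selection lemma: A's repeated first-min-and-pop is the prefix of the stable sort.
lemma pv_selA_eq (n : Nat) : ∀ (d : PySem.Dict String Int), d.keys.Nodup →
    similar_tweets_selA n d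
      = ((PySem.List.sorted d.items (fun p => p.2)).take n).map (fun p => p.1) := by
  induction n with
  | zero => intro d _; simp [similar_tweets_selA]
  | succ n ih =>
    intro d hn
    rw [similar_tweets_selA]
    by_cases hsz : d.size = 0
    · have hit : d.items = [] := List.length_eq_zero_iff.mp hsz
      simp [hsz, hit, PySem.List.sorted]
    · simp only [hsz, if_false]
      have hne : d.items ≠ [] := by
        intro h0
        exact hsz (by simp [PySem.Dict.size, h0])
      rcases hmin : PySem.List.min? d.items (fun p => p.2) with _ | m
      · exact absurd ((PySem.List.min?_eq_none_iff _ _).mp hmin) hne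
      · have hkeys : (d.items.map Prod.fst).Nodup := hn
        rw [pv_sorted_min_cons d.items hkeys m hmin]
        have herase : (d.erase m.1).items = d.items.filter (fun p => !(p.1 == m.1)) := rfl
        have hnodup' : (d.erase m.1).keys.Nodup := by
          have hsub : ((d.erase m.1).items.map Prod.fst).Sublist (d.items.map Prod.fst) :=
            List.Sublist.map Prod.fst List.filter_sublist
          exact hsub.nodup hn
        dsimp only
        rw [ih (d.erase m.1) hnodup', herase]
        simp

-- the built dict has nodup keys
lemma pv_counts_nodup (words tweets : List String) :
    (tweets.foldl (fun d tweet =>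
      words.foldl (fun d word =>
        if PySem.Str.isIn word tweet then d.insert word (d.getD word 0 + 1) else d) d)
      (PySem.Dict.empty : PySem.Dict String Int)).keys.Nodup := by
  refine pv_foldl_pres (fun d : PySem.Dict String Int => d.keys.Nodup)
    (fun d tweet => words.foldl (fun d word =>
      if PySem.Str.isIn word tweet then d.insert word (d.getD word 0 + 1) else d) d)
    ?_ tweets (PySem.Dict.empty : PySem.Dict String Int) ?_
  · intro d t hd
    refine pv_foldl_pres (fun d : PySem.Dict String Int => d.keys.Nodup)
      (fun d word => if PySem.Str.isIn word t then d.insert word (d.getD word 0 + 1) else d)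
      ?_ words d hd
    intro d w hdw
    dsimp only
    split
    · exact PySem.Dict.nodup_keys_insert d w (d.getD w 0 + 1) hdw
    · exact hdw
  · simp [PySem.Dict.keys, PySem.Dict.empty]

-- ===== VERDICT (by name: the statement is the Claim_ definition above) =====
theorem similar_tweets_spec : Claim_equal_similar_tweets := by
  intro words tweets k _
  simp only [Spec_similar_tweets, similar_tweets, similar_tweets_alt]
  -- phase 1: the two dict-building folds coincide
  have hstep : ∀ t : String,
      (fun (d : PySem.Dict String Int) word =>
        if PySem.Str.isIn word t then
          if d.contains word then d.modify word 0 (· + 1) else d.insert word 1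
        else d)
      = (fun (d : PySem.Dict String Int) word =>
        if PySem.Str.isIn word t then d.insert word (d.getD word 0 + 1) else d) := by
    intro t
    funext d w
    exact pv_step_eq d w t
  have hbody : (fun (d : PySem.Dict String Int) (tweet_index : Nat) =>
      words.foldl (fun d word =>
        if PySem.Str.isIn word (tweets.getD tweet_index "") then
          if d.contains word then d.modify word 0 (· + 1) else d.insert word 1
        else d) d)
      = (fun (d : PySem.Dict String Int) (tweet_index : Nat) =>
      words.foldl (fun d word =>
        if PySem.Str.isIn word (tweets.getD tweet_index "") then
          d.insert word (d.getD word 0 + 1)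
        else d) d) := by
    funext d i
    rw [hstep (tweets.getD i "")]
  rw [hbody,
    pv_foldl_range_getD tweets
      (fun d tweet => words.foldl (fun d word =>
        if PySem.Str.isIn word tweet then d.insert word (d.getD word 0 + 1) else d) d)
      (PySem.Dict.empty : PySem.Dict String Int)]
  -- phase 2: selection = prefix of the stable sort
  rw [pv_selA_eq k.toNat _ (pv_counts_nodup words tweets)]
  rw [PySem.List.slice_to _ (le_max_left 0 k)]
  have hmaxnat : (max 0 k).toNat = k.toNat := by omega
  rw [hmaxnat]
  -- phase 3: the append loop is a filter
  rw [PySem.List.foldl_append_if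
    (fun tweet => List.any
      (List.map (fun p => p.1)
        (List.take k.toNat
          (PySem.List.sorted
            (tweets.foldl (fun d tweet =>
              words.foldl (fun d word =>
                if PySem.Str.isIn word tweet then d.insert word (d.getD word 0 + 1) else d) d)
              (PySem.Dict.empty : PySem.Dict String Int)).items (fun p => p.2))))
      (fun word => PySem.Str.isIn word tweet))
    (fun x => x) tweets []]
  simp
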